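-- pv_equiv track=rewrite | github.com/surajit93/open-university-video | trend_based_youtube_video_generator_uploader.py | enforce_scene_entropy
-- ===== SOURCE A (Python) =====
-- def classify_scene(scene):
--
--     text = scene["text"].lower()
--
--     if "?" in text:
--         return "question"
--
--     if "but" in text or "however" in text:
--         return "twist"
--
--     if "because" in text or "reason" in text:
--         return "partial_answer"
--
--     return "escalation"
--
-- def enforce_scene_entropy(scenes):
--
--     prev = None
--
--     for s in scenes:
--
--         t = classify_scene(s)
--
--         if t == prev:
--             s["text"] = "But something unexpected changed everything."
--
--         prev = t
--
--     return scenes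
-- ===== SOURCE B (Python) =====
-- MSG = "But something unexpected changed everything."
--
--
-- def classify_scene(scene):
--
--     text = scene["text"].lower()
--
--     if "?" in text:
--         return "question"
--
--     if "but" in text or "however" in text:
--         return "twist"
--
--     if "because" in text or "reason" in text:
--         return "partial_answer"
--
--     return "escalation"
--
--
-- def enforce_scene_entropy(scenes):
--     # Run-based algorithm: keep the pending scenes on an explicit stack; each
--     # outer step pops one run head (kept verbatim), and the inner loop pops
--     # the rest of that maximal same-class run, rewriting each member's text.
--     # Pure rebuild: unlike A it does not mutate the scene dicts in place; the
--     # returned value is the same.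
--     out = []
--     todo = scenes[::-1]  # stack with the first scene on top
--     while todo:
--         head = todo.pop()
--         c = classify_scene(head)
--         out.append(head)
--         while todo and classify_scene(todo[-1]) == c:
--             out.append({**todo.pop(), "text": MSG})
--     return out
-- ===== Notes on version B (the rewrite author's own statement) =====
-- stated objective: alternative
-- what changed: Replaces A's single prev-tracking mutation pass with a run-based algorithm: an explicit pending stack, an outer loop popping each maximal same-class run's head and an inner loop popping and rewriting the rest of the run, rebuilding the list purely instead of mutating in place.
import Mathlib
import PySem

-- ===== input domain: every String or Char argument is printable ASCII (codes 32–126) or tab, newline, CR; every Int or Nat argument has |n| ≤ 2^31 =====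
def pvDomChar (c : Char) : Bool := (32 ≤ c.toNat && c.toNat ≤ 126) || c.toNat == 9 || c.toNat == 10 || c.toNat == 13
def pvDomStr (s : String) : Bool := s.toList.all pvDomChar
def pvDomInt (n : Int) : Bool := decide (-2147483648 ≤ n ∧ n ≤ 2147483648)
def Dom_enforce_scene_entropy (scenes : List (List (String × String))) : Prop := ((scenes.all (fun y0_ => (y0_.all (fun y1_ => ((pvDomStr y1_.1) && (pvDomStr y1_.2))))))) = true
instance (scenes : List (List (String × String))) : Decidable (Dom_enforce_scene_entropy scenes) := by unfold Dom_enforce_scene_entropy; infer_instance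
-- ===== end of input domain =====

-- B rebuilds the list with a run-based stack algorithm (outer loop per maximal
-- same-class run, inner loop rewriting the run's tail) instead of A's single
-- prev-tracking pass (alternative decomposition, same cost); A mutates the scene
-- dicts in place while B rebuilds purely — the equivalence proved is about the
-- return value only.


-- ===== PORT A =====
def pvMsg : String := "But something unexpected changed everything."

-- classify_scene is byte-identical in Source A and Source B, so both ports share this helper.
-- scene["text"] raises KeyError when the key is absent; that input is excluded by
-- Pre_ below, so the .getD "" totalization is never reached on admitted inputs.
def classify_scene (scene : List (String × String)) : String :=
  let text := PySem.Str.lower (((PySem.Dict.mk scene).get? "text").getD "")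
  if PySem.Str.isIn "?" text then "question"
  else if PySem.Str.isIn "but" text || PySem.Str.isIn "however" text then "twist"
  else if PySem.Str.isIn "because" text || PySem.Str.isIn "reason" text then "partial_answer"
  else "escalation"

def enforce_scene_entropy (scenes : List (List (String × String))) : List (List (String × String)) :=
  (scenes.foldl
    (fun (st : Option String × List (List (String × String))) s =>
      let t := classify_scene s
      let s' := if some t = st.1 then ((PySem.Dict.mk s).insert "text" pvMsg).items else s
      (some t, st.2 ++ [s']))
    (none, [])).2

-- ===== PORT B =====
-- The inner while loop of Source B: pop and rewrite pending scenes while their class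
-- equals c; returns (rewritten run tail, remaining stack).  (The Python keeps the
-- pending scenes as a reversed list popped from the end; the port keeps them in
-- original order and takes from the front — the same scenes in the same order.)
def pvInnerRun (c : String) (todo : List (List (String × String))) :
    List (List (String × String)) × List (List (String × String)) :=
  match todo with
  | [] => ([], [])
  | s :: t =>
      if classify_scene s = c then
        let p := pvInnerRun c t
        (((PySem.Dict.mk s).insert "text" pvMsg).items :: p.1, p.2)
      else ([], s :: t)

lemma pvInnerRun_len (c : String) (todo : List (List (String × String))) :
    (pvInnerRun c todo).2.length ≤ todo.length := by
  induction todo with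
  | nil => simp [pvInnerRun]
  | cons s t ih =>
      simp only [pvInnerRun]
      split
      · exact Nat.le_succ_of_le ih
      · simp

-- The outer while loop of Source B: pop a run head, keep it, consume its run.
def pvOuterLoop (todo : List (List (String × String))) : List (List (String × String)) :=
  match todo with
  | [] => []
  | s :: t =>
      let p := pvInnerRun (classify_scene s) t
      s :: (p.1 ++ pvOuterLoop p.2)
termination_by todo.length
decreasing_by exact Nat.lt_succ_of_le (pvInnerRun_len _ _)

def enforce_scene_entropy_alt (scenes : List (List (String × String))) : List (List (String × String)) :=
  pvOuterLoop scenes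

-- ===== PRECONDITION & SPEC =====
-- Pre_ excludes scenes missing the "text" key, on which both Pythons raise KeyError.
def Pre_enforce_scene_entropy (scenes : List (List (String × String))) : Prop :=
  ∀ s ∈ scenes, (PySem.Dict.mk s).contains "text" = true
instance (scenes : List (List (String × String))) : Decidable (Pre_enforce_scene_entropy scenes) := by unfold Pre_enforce_scene_entropy; infer_instance

def pvWitness_enforce_scene_entropy : (List (List (String × String))) :=
  [[("text", "why?")], [("text", "because of that")]]

def Spec_enforce_scene_entropy (scenes : List (List (String × String))) (out : List (List (String × String))) : Prop := out = enforce_scene_entropy_alt scenes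
instance (scenes : List (List (String × String))) (out : List (List (String × String))) : Decidable (Spec_enforce_scene_entropy scenes out) := by unfold Spec_enforce_scene_entropy; infer_instance

-- ===== CLAIM (what is proved, stated in full; the proofs are below) =====
def Claim_equal_enforce_scene_entropy : Prop := ∀ (scenes : List (List (String × String))), Dom_enforce_scene_entropy scenes → Pre_enforce_scene_entropy scenes → Spec_enforce_scene_entropy scenes (enforce_scene_entropy scenes)

-- ===== LEMMAS AND PROOFS =====
-- Loop invariant: A's fold started with prev = some c over the pending scenes
-- produces the accumulator, then B's rewritten run tail for class c, then B's
-- outer loop on the remaining stack.  Strong induction via a length bound.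
lemma pv_loop : ∀ (n : Nat) (rest : List (List (String × String))), rest.length ≤ n →
    ∀ (c : String) (acc : List (List (String × String))),
    (rest.foldl
      (fun (st : Option String × List (List (String × String))) s =>
        let t := classify_scene s
        let s' := if some t = st.1 then ((PySem.Dict.mk s).insert "text" pvMsg).items else s
        (some t, st.2 ++ [s']))
      (some c, acc)).2 =
    acc ++ (pvInnerRun c rest).1 ++ pvOuterLoop (pvInnerRun c rest).2 := by
  intro n
  induction n with
  | zero =>
      intro rest h c acc
      have : rest = [] := List.length_eq_zero_iff.mp (Nat.le_zero.mp h)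
      subst this; simp [pvInnerRun, pvOuterLoop]
  | succ n ih =>
      intro rest h c acc
      cases rest with
      | nil => simp [pvInnerRun, pvOuterLoop]
      | cons s t =>
          have ht : t.length ≤ n := Nat.lt_succ_iff.mp (by simpa using h)
          by_cases hc : classify_scene s = c
          · simp only [List.foldl, pvInnerRun, hc, if_pos rfl]
            rw [ih t ht c]
            simp
          · have hne : ¬ some (classify_scene s) = some c := by simpa using hc
            simp only [List.foldl, pvInnerRun, if_neg hne, if_neg hc]
            rw [ih t ht (classify_scene s)]
            conv_rhs => rw [pvOuterLoop]
            simp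

-- ===== VERDICT (by name: the statement is the Claim_ definition above) =====
theorem enforce_scene_entropy_spec : Claim_equal_enforce_scene_entropy := by
  intro scenes _ _
  show enforce_scene_entropy scenes = enforce_scene_entropy_alt scenes
  cases scenes with
  | nil => simp [enforce_scene_entropy, enforce_scene_entropy_alt, pvOuterLoop]
  | cons s t =>
      unfold enforce_scene_entropy enforce_scene_entropy_alt
      simp only [List.foldl]
      rw [pv_loop t.length t (Nat.le_refl _)]
      conv_rhs => rw [pvOuterLoop]
      simp
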